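-- pv_equiv track=rewrite | github.com/pabloschwarzenberg/grader | hito2_ej2/hito2_ej2_39de4068a677ffd112d4b0a1c5a365b5.py | secuencia
-- ===== SOURCE A (Python) =====
-- def secuencia(palabra):
-- 	ABC="ACGT"
-- 	abc="acgt"
-- 	contador=0
-- 	for i in range(len(palabra)):
-- 		if palabra[i] in abc or palabra[i] in abc:
-- 			contador+=1
-- 	if contador==int(len(palabra)):
-- 		return "es secuencia"
-- 	return "no es secuenecia"
-- ===== SOURCE B (Python) =====
-- def secuencia(palabra):
--     if set(palabra) <= set("acgt"):
--         return "es secuencia"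
--     return "no es secuenecia"
-- ===== Notes on version B (the rewrite author's own statement) =====
-- stated objective: simpler
-- what changed: Replaces the per-index counting loop and the count-equals-length comparison with a single subset test of the word's distinct characters against the allowed DNA alphabet.
import Mathlib
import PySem

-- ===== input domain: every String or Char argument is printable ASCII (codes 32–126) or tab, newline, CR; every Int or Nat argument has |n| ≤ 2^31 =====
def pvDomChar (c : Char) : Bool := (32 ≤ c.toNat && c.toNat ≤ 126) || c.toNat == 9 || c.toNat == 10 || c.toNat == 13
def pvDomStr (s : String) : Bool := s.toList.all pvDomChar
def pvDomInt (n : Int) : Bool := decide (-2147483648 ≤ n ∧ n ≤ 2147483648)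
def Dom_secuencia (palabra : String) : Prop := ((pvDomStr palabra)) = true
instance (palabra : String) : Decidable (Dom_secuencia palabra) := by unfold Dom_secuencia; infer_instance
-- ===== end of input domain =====

-- B subset-tests the distinct characters instead of counting matching positions; objective: simpler.

-- ===== PORT A =====
def secuencia (palabra : String) : String :=
  let abc : List Char := "acgt".toList
  let contador : Int :=
    (PySem.List.pyRange 0 (palabra.toList.length : Int) 1).foldl
      (fun acc i =>
        if PySem.List.pyGetD palabra.toList i ' ' ∈ abc ∨
           PySem.List.pyGetD palabra.toList i ' ' ∈ abc then acc + 1 else acc)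
      (0 : Int)
  if contador = (palabra.toList.length : Int) then "es secuencia" else "no es secuenecia"

-- ===== PORT B =====
def secuencia_alt (palabra : String) : String :=
  if PySem.Set.issubset (PySem.Set.ofList palabra.toList) (PySem.Set.ofList "acgt".toList)
  then "es secuencia" else "no es secuenecia"

-- ===== PRECONDITION & SPEC =====
def Spec_secuencia (palabra : String) (out : String) : Prop := out = secuencia_alt palabra
instance (palabra : String) (out : String) : Decidable (Spec_secuencia palabra out) := by unfold Spec_secuencia; infer_instance

-- ===== CLAIM (what is proved, stated in full; the proofs are below) =====
def Claim_equal_secuencia : Prop := ∀ (palabra : String), Dom_secuencia palabra → Spec_secuencia palabra (secuencia palabra)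

-- ===== LEMMAS AND PROOFS =====

theorem countP_eq_length_iff {α : Type} (l : List α) (p : α → Bool) :
    l.countP p = l.length ↔ ∀ x ∈ l, p x = true := by
  induction l with
  | nil => simp
  | cons a t ih =>
    by_cases h : p a = true
    · simp [h, ih]
    · simp only [List.countP_cons, h]
      constructor
      · intro he
        have := List.countP_le_length (p := p) (l := t)
        simp at he; omega
      · intro hall
        exact absurd (hall a (by simp)) h

-- ===== VERDICT (by name: the statement is the Claim_ definition above) =====
theorem secuencia_spec : Claim_equal_secuencia := by
  intro palabra _
  unfold Spec_secuencia secuencia secuencia_alt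
  simp only []
  rw [PySem.List.foldl_pyRange_zero_pyGetD' palabra.toList ' '
      (fun acc c => if c ∈ "acgt".toList ∨ c ∈ "acgt".toList then acc + 1 else acc) 0]
  rw [PySem.List.foldl_ite_add_one]
  have hiff :
      ((0 : Int) + (palabra.toList.countP fun c => decide (c ∈ "acgt".toList ∨ c ∈ "acgt".toList)) = (palabra.toList.length : Int))
        ↔ PySem.Set.issubset (PySem.Set.ofList palabra.toList) (PySem.Set.ofList "acgt".toList) = true := by
    rw [PySem.Set.issubset_iff]
    constructor
    · intro h x hx
      rw [PySem.Set.mem_ofList] at hx ⊢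
      have hc : palabra.toList.countP (fun c => decide (c ∈ "acgt".toList ∨ c ∈ "acgt".toList)) = palabra.toList.length := by omega
      have := (countP_eq_length_iff _ _).mp hc x hx
      simpa using this
    · intro h
      have hc : palabra.toList.countP (fun c => decide (c ∈ "acgt".toList ∨ c ∈ "acgt".toList)) = palabra.toList.length := by
        rw [countP_eq_length_iff]
        intro x hx
        have := h x (by rw [PySem.Set.mem_ofList]; exact hx)
        rw [PySem.Set.mem_ofList] at this
        exact decide_eq_true (Or.inl this)
      omega
  by_cases hcond : PySem.Set.issubset (PySem.Set.ofList palabra.toList) (PySem.Set.ofList "acgt".toList) = true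
  · rw [if_pos (hiff.mpr hcond), if_pos hcond]
  · rw [if_neg (fun h => hcond (hiff.mp h)), if_neg hcond]
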